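-- pv_equiv track=rewrite | github.com/LMFDB/lmfdb | lmfdb/higher_genus_w_automorphisms/main.py | label_to_breadcrumbs
-- ===== SOURCE A (Python) =====
-- def label_to_breadcrumbs(L):
--     newsig = '['+L[0]
--     for i in range(1, len(L)):
--         if (L[i] == '-'):
--             newsig += ","
--         elif (L[i] == '.'):
--             newsig += ';'
--         elif (L[i] == '0' and L[i-1] == '.'):  # The case where there is no ramification gives a 0 in signature
--             newsig += '-'
--         else:
--             newsig += L[i]
--
--     newsig += ']'
--     return newsig
-- ===== SOURCE B (Python) =====
-- def label_to_breadcrumbs(L):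
--     first = L[0]
--     pieces = L[1:].split('.')
--
--     def conv(p, zero_ok):
--         if zero_ok and p.startswith('0'):
--             return '-' + p[1:].replace('-', ',')
--         return p.replace('-', ',')
--
--     out = ['[', first, conv(pieces[0], first == '.')]
--     for p in pieces[1:]:
--         out.append(';')
--         out.append(conv(p, True))
--     out.append(']')
--     return ''.join(out)
-- ===== Notes on version B (the rewrite author's own statement) =====
-- stated objective: alternative
-- what changed: B replaces A's index-by-index scan carrying the previous character with a split decomposition: keep the first character verbatim, split the rest at dots into pieces, convert each piece (dash to comma, a piece-leading zero to a minus sign, applied to the first piece only when the first character is a dot), and join the pieces with semicolons via one str.join; Pre_ excludes only the empty string, on which both A and B raise IndexError.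
import Mathlib
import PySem

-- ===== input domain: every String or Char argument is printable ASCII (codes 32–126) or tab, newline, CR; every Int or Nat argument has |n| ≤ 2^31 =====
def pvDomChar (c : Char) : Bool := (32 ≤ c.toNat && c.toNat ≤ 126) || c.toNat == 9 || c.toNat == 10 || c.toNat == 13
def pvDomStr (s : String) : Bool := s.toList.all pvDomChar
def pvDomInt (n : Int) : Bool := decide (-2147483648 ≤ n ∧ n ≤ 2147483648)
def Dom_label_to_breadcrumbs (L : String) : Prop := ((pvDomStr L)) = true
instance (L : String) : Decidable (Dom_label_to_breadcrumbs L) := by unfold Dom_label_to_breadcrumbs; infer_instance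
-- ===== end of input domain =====

-- B keeps L[0] verbatim, splits the remainder on '.', and converts each piece
-- ('-'→',', a piece-leading '0'→'-') instead of A's index-by-index scan; objective: simpler decomposition.

-- ===== PORT A =====
-- A walks indices 1..len-1 carrying the previous character; ported as a fold
-- over the tail with state (accumulated chars, previous char).
def label_to_breadcrumbs (L : String) : String :=
  match L.toList with
  | [] => ""   -- Python raises IndexError on L[0]; excluded by Pre_
  | c0 :: rest =>
    let res := rest.foldl
      (fun (st : List Char × Char) c =>
        (st.1 ++ (if c = '-' then [','] else if c = '.' then [';']
          else if c = '0' ∧ st.2 = '.' then ['-'] else [c]), c))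
      (['[', c0], c0)
    String.mk (res.1 ++ [']'])

-- ===== PORT B =====
-- str.replace('-', ',') on a piece
def pvDashes (p : List Char) : List Char := p.map (fun c => if c = '-' then ',' else c)

-- str.split('.') (single-char separator), hand-ported: always returns ≥ 1 piece
def pvSplitDots : List Char → List (List Char)
  | [] => [[]]
  | c :: cs =>
    if c = '.' then [] :: pvSplitDots cs
    else match pvSplitDots cs with
      | p :: ps => (c :: p) :: ps
      | [] => [[c]]   -- unreachable: pvSplitDots never returns []

-- conv(p, zero_ok) from Source B
def pvConv (zeroOk : Bool) (p : List Char) : List Char :=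
  if zeroOk ∧ p.head? = some '0' then '-' :: pvDashes p.tail else pvDashes p

def label_to_breadcrumbs_alt (L : String) : String :=
  match L.toList with
  | [] => ""   -- Python raises IndexError on L[0]; excluded by Pre_
  | c0 :: rest =>
    let pieces := pvSplitDots rest
    let body := pvConv (c0 = '.') (pieces.headD []) ++
      pieces.tail.foldl (fun acc p => acc ++ [';'] ++ pvConv true p) []
    String.mk ('[' :: c0 :: body ++ [']'])

-- ===== PRECONDITION & SPEC =====
-- Python A raises IndexError on the empty string (L[0]); B raises there too.
def Pre_label_to_breadcrumbs (L : String) : Prop := L ≠ ""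
instance (L : String) : Decidable (Pre_label_to_breadcrumbs L) := by unfold Pre_label_to_breadcrumbs; infer_instance
def pvWitness_label_to_breadcrumbs : String := "2.5-0.1-2"

def Spec_label_to_breadcrumbs (L : String) (out : String) : Prop := out = label_to_breadcrumbs_alt L
instance (L : String) (out : String) : Decidable (Spec_label_to_breadcrumbs L out) := by unfold Spec_label_to_breadcrumbs; infer_instance

-- ===== CLAIM (what is proved, stated in full; the proofs are below) =====
def Claim_equal_label_to_breadcrumbs : Prop := ∀ (L : String), Dom_label_to_breadcrumbs L → Pre_label_to_breadcrumbs L → Spec_label_to_breadcrumbs L (label_to_breadcrumbs L)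

-- ===== LEMMAS AND PROOFS =====

-- Canonical form of the scan: flag = "previous char was '.'".
def pvF (b : Bool) : List Char → List Char
  | [] => []
  | c :: cs =>
    if c = '-' then ',' :: pvF false cs
    else if c = '.' then ';' :: pvF true cs
    else if c = '0' ∧ b then '-' :: pvF false cs
    else c :: pvF false cs

theorem pvA_foldl (cs : List Char) : ∀ (acc : List Char) (prev : Char),
    (cs.foldl (fun (st : List Char × Char) c =>
        (st.1 ++ (if c = '-' then [','] else if c = '.' then [';']
          else if c = '0' ∧ st.2 = '.' then ['-'] else [c]), c)) (acc, prev)).1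
      = acc ++ pvF (prev = '.') cs := by
  induction cs with
  | nil => intro acc prev; simp [pvF]
  | cons c cs ih =>
    intro acc prev
    simp only [List.foldl_cons, ih, pvF]
    by_cases h1 : c = '-'
    · simp [h1]
    · by_cases h2 : c = '.'
      · simp [h1, h2]
      · by_cases h3 : c = '0' ∧ prev = '.'
        · rcases h3 with ⟨h3a, h3b⟩
          simp [h1, h2, h3a, h3b]
        · by_cases h4 : c = '0'
          · have hb : ¬ prev = '.' := fun hp => h3 ⟨h4, hp⟩
            simp [h1, h2, h4, hb]
          · simp [h1, h2, h3, h4]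

theorem pvSplitDots_ne_nil (cs : List Char) : pvSplitDots cs ≠ [] := by
  cases cs with
  | nil => simp [pvSplitDots]
  | cons c cs =>
    simp only [pvSplitDots]
    split
    · simp
    · cases h : pvSplitDots cs <;> simp

theorem pvB_foldl (ps : List (List Char)) : ∀ (acc : List Char),
    ps.foldl (fun acc p => acc ++ [';'] ++ pvConv true p) acc
      = acc ++ ps.flatMap (fun p => ';' :: pvConv true p) := by
  induction ps with
  | nil => intro acc; simp
  | cons p ps ih => intro acc; simp [ih, List.flatMap]

theorem pvB_eq_pvF (cs : List Char) : ∀ (b : Bool),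
    pvConv b ((pvSplitDots cs).headD []) ++
      (pvSplitDots cs).tail.flatMap (fun p => ';' :: pvConv true p) = pvF b cs := by
  induction cs with
  | nil => intro b; simp [pvSplitDots, pvConv, pvDashes, pvF]
  | cons c cs ih =>
    intro b
    obtain ⟨p0, ps0, hps⟩ : ∃ p0 ps0, pvSplitDots cs = p0 :: ps0 := by
      cases h : pvSplitDots cs with
      | nil => exact absurd h (pvSplitDots_ne_nil cs)
      | cons p ps => exact ⟨p, ps, rfl⟩
    have ih' : ∀ b, pvConv b p0 ++ ps0.flatMap (fun p => ';' :: pvConv true p) = pvF b cs := by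
      intro b'; have := ih b'; rwa [hps] at this
    by_cases h2 : c = '.'
    · have hsp : pvSplitDots (c :: cs) = [] :: p0 :: ps0 := by
        simp [pvSplitDots, h2, hps]
      rw [hsp]
      simp only [List.headD_cons, List.tail_cons, List.flatMap_cons]
      have hcv : pvConv b [] = [] := by simp [pvConv, pvDashes]
      rw [hcv, List.nil_append]
      have hf : pvF b (c :: cs) = ';' :: pvF true cs := by simp [pvF, h2]
      rw [hf, List.cons_append, ih' true]
    · have hsp : pvSplitDots (c :: cs) = (c :: p0) :: ps0 := by
        simp [pvSplitDots, h2, hps]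
      rw [hsp]
      simp only [List.headD_cons, List.tail_cons]
      by_cases h1 : c = '-'
      · have hc : pvConv b (c :: p0) = ',' :: pvConv false p0 := by
          simp [pvConv, h1, pvDashes]
        have hf : pvF b (c :: cs) = ',' :: pvF false cs := by simp [pvF, h1]
        rw [hc, hf, List.cons_append, ih' false]
      · by_cases h4 : c = '0'
        · cases b with
          | false =>
            have hc : pvConv false (c :: p0) = c :: pvConv false p0 := by
              simp [pvConv, pvDashes, h1]
            have hf : pvF false (c :: cs) = c :: pvF false cs := by
              simp [pvF, h1, h2]
            rw [hc, hf, List.cons_append, ih' false]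
          | true =>
            have hc : pvConv true (c :: p0) = '-' :: pvConv false p0 := by
              simp [pvConv, pvDashes, h4]
            have hf : pvF true (c :: cs) = '-' :: pvF false cs := by
              simp [pvF, h1, h2, h4]
            rw [hc, hf, List.cons_append, ih' false]
        · have hc : pvConv b (c :: p0) = c :: pvConv false p0 := by
            simp [pvConv, pvDashes, h1, h4]
          have hf : pvF b (c :: cs) = c :: pvF false cs := by
            simp [pvF, h1, h2, h4]
          rw [hc, hf, List.cons_append, ih' false]

-- ===== VERDICT (by name: the statement is the Claim_ definition above) =====
theorem label_to_breadcrumbs_spec : Claim_equal_label_to_breadcrumbs := by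
  intro L _ _
  unfold Spec_label_to_breadcrumbs label_to_breadcrumbs label_to_breadcrumbs_alt
  cases hL : L.toList with
  | nil => rfl
  | cons c0 rest =>
    simp only []
    rw [pvA_foldl rest ['[', c0] c0, pvB_foldl, ← pvB_eq_pvF rest (c0 = '.')]
    simp
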